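-- pv_equiv track=rewrite | github.com/Theoretician9/Service | app/orchestrator/dependency_resolver.py | get_next_miniservice
-- ===== SOURCE A (Python) =====
-- ARTIFACT_TO_MINISERVICE = {
--     "goal_tree": "goal_setting",
--     "niche_table": "niche_selection",
--     "decomposition_hypothesis_report": "decomposition_hypothesis",
--     "supplier_list": "supplier_search",
--     "sales_script": "sales_scripts",
--     "ad_set": "ad_creation",
--     "lead_list": "lead_search",
-- }
--
-- NEXT_STEP_CHAIN = [
--     ([], "goal_setting"),
--     (["goal_tree"], "niche_selection"),
--     (["goal_tree", "niche_table"], "decomposition_hypothesis"),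
--     (["goal_tree", "niche_table", "decomposition_hypothesis_report"], "supplier_search"),
-- ]
--
-- def get_next_miniservice(existing_artifact_types: list[str]) -> str | None:
--     """Deterministically compute the next recommended miniservice.
--
--     Returns miniservice_id or None if all main chain steps are done.
--     """
--     existing = set(existing_artifact_types)
--     for required_artifacts, next_ms in NEXT_STEP_CHAIN:
--         if all(a in existing for a in required_artifacts):
--             # Check if this miniservice's artifact already exists
--             ms_artifact = None
--             for art, ms in ARTIFACT_TO_MINISERVICE.items():
--                 if ms == next_ms:
--                     ms_artifact = art
--                     break
--             if ms_artifact and ms_artifact not in existing: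
--                 return next_ms
--     return None
-- ===== SOURCE B (Python) =====
-- CHAIN = [
--     ("goal_tree", "goal_setting"),
--     ("niche_table", "niche_selection"),
--     ("decomposition_hypothesis_report", "decomposition_hypothesis"),
--     ("supplier_list", "supplier_search"),
-- ]
--
-- def get_next_miniservice(existing_artifact_types: list[str]) -> str | None:
--     existing = set(existing_artifact_types)
--     return next((ms for art, ms in CHAIN if art not in existing), None)
-- ===== Notes on version B (the rewrite author's own statement) =====
-- stated objective: simpler
-- what changed: Replaces the nested chain-scan with a reverse lookup over ARTIFACT_TO_MINISERVICE by a single ordered walk over inlined (output_artifact, miniservice) pairs, returning the miniservice of the first missing artifact; correct because each chain step's requirements are exactly the prior outputs.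
import Mathlib
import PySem

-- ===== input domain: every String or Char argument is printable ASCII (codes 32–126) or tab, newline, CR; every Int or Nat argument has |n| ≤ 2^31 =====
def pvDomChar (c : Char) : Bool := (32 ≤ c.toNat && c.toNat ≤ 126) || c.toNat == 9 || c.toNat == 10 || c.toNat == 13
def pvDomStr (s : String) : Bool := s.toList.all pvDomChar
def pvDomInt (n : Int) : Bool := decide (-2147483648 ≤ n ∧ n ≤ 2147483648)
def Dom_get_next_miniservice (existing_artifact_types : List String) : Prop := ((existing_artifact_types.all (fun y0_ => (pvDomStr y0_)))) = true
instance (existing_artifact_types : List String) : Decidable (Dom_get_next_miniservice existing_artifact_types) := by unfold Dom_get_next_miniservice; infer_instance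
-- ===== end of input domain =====

-- B replaces A's nested chain-scan with reverse-map lookup by one ordered walk over inlined (artifact, miniservice) pairs: simpler, same result.


-- ===== PORT A =====
-- A port: literal transliteration of A (nested chain scan + reverse lookup in the artifact map).
def pvA2M : List (String × String) :=
  [("goal_tree", "goal_setting"),
   ("niche_table", "niche_selection"),
   ("decomposition_hypothesis_report", "decomposition_hypothesis"),
   ("supplier_list", "supplier_search"),
   ("sales_script", "sales_scripts"),
   ("ad_set", "ad_creation"),
   ("lead_list", "lead_search")]

def pvChain : List (List String × String) :=
  [([], "goal_setting"),
   (["goal_tree"], "niche_selection"),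
   (["goal_tree", "niche_table"], "decomposition_hypothesis"),
   (["goal_tree", "niche_table", "decomposition_hypothesis_report"], "supplier_search")]

-- inner loop: first art whose ms == next_ms (Python's 'for art, ms in ...: if ms == next_ms: break')
def pvFindArt (next_ms : String) : List (String × String) → Option String
  | [] => none
  | (art, ms) :: rest => if ms = next_ms then some art else pvFindArt next_ms rest

-- outer loop over NEXT_STEP_CHAIN
def pvLoopA (existing : PySem.Set String) : List (List String × String) → Option String
  | [] => none
  | (req, nms) :: rest =>
    if req.all (fun a => PySem.Set.contains existing a) then
      match pvFindArt nms pvA2M with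
      | some art =>
          -- 'if ms_artifact and ms_artifact not in existing' (string truthiness = nonempty)
          if art ≠ "" ∧ PySem.Set.contains existing art = false then some nms
          else pvLoopA existing rest
      | none => pvLoopA existing rest
    else pvLoopA existing rest

def get_next_miniservice (existing_artifact_types : List String) : Option String :=
  pvLoopA (PySem.Set.ofList existing_artifact_types) pvChain

-- ===== PORT B =====
-- B port: single ordered walk over inlined (output_artifact, miniservice) pairs.
def pvChainB : List (String × String) :=
  [("goal_tree", "goal_setting"),
   ("niche_table", "niche_selection"),
   ("decomposition_hypothesis_report", "decomposition_hypothesis"),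
   ("supplier_list", "supplier_search")]

def get_next_miniservice_alt (existing_artifact_types : List String) : Option String :=
  let existing := PySem.Set.ofList existing_artifact_types
  (pvChainB.find? (fun p => !(PySem.Set.contains existing p.1))).map Prod.snd

-- ===== PRECONDITION & SPEC =====
def Spec_get_next_miniservice (existing_artifact_types : List String) (out : Option String) : Prop := out = get_next_miniservice_alt existing_artifact_types
instance (existing_artifact_types : List String) (out : Option String) : Decidable (Spec_get_next_miniservice existing_artifact_types out) := by unfold Spec_get_next_miniservice; infer_instance

-- ===== CLAIM (what is proved, stated in full; the proofs are below) =====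
def Claim_equal_get_next_miniservice : Prop := ∀ (existing_artifact_types : List String), Dom_get_next_miniservice existing_artifact_types → Spec_get_next_miniservice existing_artifact_types (get_next_miniservice existing_artifact_types)

-- ===== LEMMAS AND PROOFS =====

-- ===== VERDICT (by name: the statement is the Claim_ definition above) =====
theorem get_next_miniservice_spec : Claim_equal_get_next_miniservice := by
  intro xs _
  unfold Spec_get_next_miniservice get_next_miniservice get_next_miniservice_alt
  by_cases h1 : "goal_tree" ∈ xs <;>
  by_cases h2 : "niche_table" ∈ xs <;>
  by_cases h3 : "decomposition_hypothesis_report" ∈ xs <;>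
  by_cases h4 : "supplier_list" ∈ xs <;>
    simp [pvLoopA, pvFindArt, pvChain, pvChainB, pvA2M, List.find?, h1, h2, h3, h4]
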